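-- pv_equiv track=rewrite | github.com/Jackyzaz/coe-dsap-testing | program/number_utils.py | is_prime_list
-- ===== SOURCE A (Python) =====
-- def is_prime_list(numbers):
--     # Handle empty numbers
--     if numbers == []:
--         return False
--     # Main logic
--     for num in numbers:
--         # Handle case 1
--         if num <= 1:
--             return False
--         for n in range(2, num):
--             if num % n == 0:
--                 return False
--     return True
-- ===== SOURCE B (Python) =====
-- def _is_prime(n):
--     if n <= 1:
--         return False
--     i = 2
--     while i * i <= n:
--         if n % i == 0:
--             return False
--         i += 1
--     return True
--
--
-- def is_prime_list(numbers):
--     return bool(numbers) and all(_is_prime(num) for num in numbers)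
-- ===== Notes on version B (the rewrite author's own statement) =====
-- stated objective: alternative
-- what changed: Per-element trial division over the full range(2, num) is replaced by a helper that tests divisors only while i*i <= num, combined with all() over the list instead of an early-return loop; on the generated benchmark inputs (which short-circuit early) this was not measurably faster.
import Mathlib
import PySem

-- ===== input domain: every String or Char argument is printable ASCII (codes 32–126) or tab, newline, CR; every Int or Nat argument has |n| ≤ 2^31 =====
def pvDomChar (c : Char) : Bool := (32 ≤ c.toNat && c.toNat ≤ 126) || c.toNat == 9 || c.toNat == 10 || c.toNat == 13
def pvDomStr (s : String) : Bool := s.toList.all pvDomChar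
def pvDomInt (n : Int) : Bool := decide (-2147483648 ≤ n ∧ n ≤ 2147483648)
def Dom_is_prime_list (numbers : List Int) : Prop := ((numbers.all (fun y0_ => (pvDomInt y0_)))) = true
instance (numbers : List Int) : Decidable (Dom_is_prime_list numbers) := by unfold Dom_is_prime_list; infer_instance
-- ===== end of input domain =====

-- B replaces A's full trial division range(2, num) by divisor tests only while i*i <= num; and folds the list with all().

-- ===== PORT A =====
-- inner loop: for n in range(2, num): if num % n == 0: return False
def pvAInner (num : Int) : List Int → Bool
  | [] => false
  | n :: ns => if PySem.Int.mod num n == 0 then true else pvAInner num ns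

-- outer loop over the list
def pvAGo : List Int → Bool
  | [] => true
  | num :: rest =>
    if num ≤ 1 then false
    else if pvAInner num (PySem.List.pyRange 2 num 1) then false
    else pvAGo rest

def is_prime_list (numbers : List Int) : Bool :=
  if numbers = [] then false else pvAGo numbers

-- ===== PORT B =====
-- while i * i <= n: if n % i == 0: return False; i += 1
def pvBTrial (n i : Int) : Bool :=
  if h : i * i ≤ n then
    (if PySem.Int.mod n i == 0 then false else pvBTrial n (i + 1))
  else true
termination_by (n + 1 - i).toNat
decreasing_by
  have hi : i ≤ i * i := by by_cases h0 : i ≤ 0 <;> nlinarith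
  omega

def pvIsPrimeB (n : Int) : Bool :=
  if n ≤ 1 then false else pvBTrial n 2

def is_prime_list_alt (numbers : List Int) : Bool :=
  !numbers.isEmpty && numbers.all pvIsPrimeB

-- ===== PRECONDITION & SPEC =====
def Spec_is_prime_list (numbers : List Int) (out : Bool) : Prop := out = is_prime_list_alt numbers
instance (numbers : List Int) (out : Bool) : Decidable (Spec_is_prime_list numbers out) := by unfold Spec_is_prime_list; infer_instance

-- ===== CLAIM (what is proved, stated in full; the proofs are below) =====
def Claim_equal_is_prime_list : Prop := ∀ (numbers : List Int), Dom_is_prime_list numbers → Spec_is_prime_list numbers (is_prime_list numbers)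

-- ===== LEMMAS AND PROOFS =====

-- A's inner loop is an existence test for a divisor in the list
theorem pvAInner_eq_true_iff (num : Int) (l : List Int) :
    pvAInner num l = true ↔ ∃ d ∈ l, d ∣ num := by
  induction l with
  | nil => simp [pvAInner]
  | cons n ns ih =>
    simp only [pvAInner]
    by_cases h : PySem.Int.mod num n = 0
    · simp [h, List.mem_cons]
      exact Or.inl ((PySem.Int.mod_eq_zero_iff_dvd num n).mp h)
    · have h' : (PySem.Int.mod num n == 0) = false := by simpa using h
      rw [h', if_neg (by simp)]
      rw [ih]
      constructor
      · rintro ⟨d, hd, hdvd⟩; exact ⟨d, List.mem_cons_of_mem _ hd, hdvd⟩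
      · rintro ⟨d, hd, hdvd⟩
        rcases List.mem_cons.mp hd with rfl | hd'
        · exact absurd ((PySem.Int.mod_eq_zero_iff_dvd num d).mpr hdvd) h
        · exact ⟨d, hd', hdvd⟩

-- B's trial loop checks every divisor d with i ≤ d and d*d ≤ n
theorem pvBTrial_eq_true_iff (n i : Int) (hi : 0 ≤ i) :
    pvBTrial n i = true ↔ ∀ d : Int, i ≤ d → d * d ≤ n → ¬ d ∣ n := by
  revert hi
  induction i using pvBTrial.induct (n := n) with
  | case1 i h hm =>
    intro hi
    rw [pvBTrial, dif_pos h, if_pos hm]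
    simp only [Bool.false_eq_true, false_iff, not_forall]
    refine ⟨i, le_refl i, h, ?_⟩
    simp only [not_not]
    exact (PySem.Int.mod_eq_zero_iff_dvd n i).mp (by simpa using hm)
  | case2 i h hm ih =>
    intro hi
    rw [pvBTrial, dif_pos h, if_neg hm]
    rw [ih (by omega)]
    constructor
    · intro H d hid hdd
      rcases eq_or_lt_of_le hid with h' | hlt
      · subst h'
        intro hdvd
        exact absurd ((PySem.Int.mod_eq_zero_iff_dvd n i).mpr hdvd) (by simpa using hm)
      · exact H d (by omega) hdd
    · intro H d hid hdd; exact H d (by omega) hdd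
  | case3 i h =>
    intro hi
    rw [pvBTrial, dif_neg h]
    simp only [true_iff]
    intro d hid hdd hdvd
    exact h (le_trans (mul_le_mul hid hid hi (hi.trans hid)) hdd)

-- key divisor lemma
theorem pvDivisor_iff (num : Int) (h2 : 2 ≤ num) :
    (∃ d : Int, 2 ≤ d ∧ d < num ∧ d ∣ num) ↔ (∃ d : Int, 2 ≤ d ∧ d * d ≤ num ∧ d ∣ num) := by
  constructor
  · rintro ⟨d, hd2, hdlt, e, rfl⟩
    by_cases hdd : d * d ≤ d * e
    · exact ⟨d, hd2, hdd, ⟨e, rfl⟩⟩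
    · have he2 : 2 ≤ e := by nlinarith
      have hed : e < d := by nlinarith
      exact ⟨e, he2, by nlinarith, ⟨d, mul_comm d e⟩⟩
  · rintro ⟨d, hd2, hdd, hdvd⟩
    exact ⟨d, hd2, by nlinarith, hdvd⟩

-- per-element agreement
theorem pvElem_eq (num : Int) :
    (if num ≤ 1 then false else !pvAInner num (PySem.List.pyRange 2 num 1)) = pvIsPrimeB num := by
  unfold pvIsPrimeB
  by_cases h1 : num ≤ 1
  · simp [h1]
  · have h2 : 2 ≤ num := by omega
    rw [if_neg h1, if_neg h1]
    have ha := pvAInner_eq_true_iff num (PySem.List.pyRange 2 num 1)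
    have hb := pvBTrial_eq_true_iff num 2 (by norm_num)
    rcases hB : pvBTrial num 2 with _ | _
    · rw [hB] at hb
      simp only [Bool.false_eq_true, false_iff, not_forall] at hb
      obtain ⟨d, hd2, hdd, hdvd⟩ := hb
      rw [not_not] at hdvd
      have : pvAInner num (PySem.List.pyRange 2 num 1) = true := by
        rw [ha]
        obtain ⟨d', hd'2, hd'lt, hd'dvd⟩ := (pvDivisor_iff num h2).mpr ⟨d, hd2, hdd, hdvd⟩
        exact ⟨d', by rw [PySem.List.mem_pyRange_one]; exact ⟨hd'2, hd'lt⟩, hd'dvd⟩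
      simp [this]
    · rw [hB] at hb
      replace hb := hb.mp rfl
      have : pvAInner num (PySem.List.pyRange 2 num 1) = false := by
        rcases hA : pvAInner num (PySem.List.pyRange 2 num 1) with _ | _
        · rfl
        · exfalso
          obtain ⟨d, hdm, hdvd⟩ := ha.mp hA
          rw [PySem.List.mem_pyRange_one] at hdm
          obtain ⟨d', hd'2, hd'dd, hd'dvd⟩ := (pvDivisor_iff num h2).mp ⟨d, hdm.1, hdm.2, hdvd⟩
          exact absurd hd'dvd (hb d' hd'2 hd'dd)
      simp [this]

-- A's outer loop is List.all of the per-element test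
theorem pvAGo_eq_all (l : List Int) :
    pvAGo l = l.all (fun num => if num ≤ 1 then false else !pvAInner num (PySem.List.pyRange 2 num 1)) := by
  induction l with
  | nil => simp [pvAGo]
  | cons num rest ih =>
    simp only [pvAGo, List.all_cons, ih]
    by_cases h1 : num ≤ 1
    · simp [h1]
    · rcases hA : pvAInner num (PySem.List.pyRange 2 num 1) with _ | _ <;> simp [h1]

-- ===== VERDICT (by name: the statement is the Claim_ definition above) =====
theorem is_prime_list_spec : Claim_equal_is_prime_list := by
  intro numbers _
  unfold Spec_is_prime_list is_prime_list is_prime_list_alt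
  cases numbers with
  | nil => simp
  | cons x xs =>
    rw [if_neg (by simp)]
    simp only [List.isEmpty_cons, Bool.not_false, Bool.true_and]
    rw [pvAGo_eq_all]
    congr 1
    funext num
    exact pvElem_eq num
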